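-- pv_equiv track=rewrite | github.com/S-hadowHeart/CyberSec-Portfolio | Projects/Advance_password_checker/main.py | dict_matches
-- ===== SOURCE A (Python) =====
-- LEET_MAP = str.maketrans({'@':'a','4':'a','0':'o','1':'l','3':'e','5':'s','$':'s','7':'t','+':'t','8':'b','2':'z'})
--
-- def leet_normalize(s):
--     return s.translate(LEET_MAP)
--
-- def all_substrings(s, min_len=3):
--     s = s.lower()
--     n = len(s)
--     for i in range(n):
--         for j in range(i+min_len, n+1):
--             yield s[i:j]
--
-- def dict_matches(pw, wordset, min_len=3):
--     found = set()
--     subs = set(all_substrings(pw, min_len=min_len))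
--     for sub in subs:
--         if sub in wordset:
--             found.add(sub)
--         else:
--             ln = leet_normalize(sub)
--             if ln in wordset:
--                 found.add(sub)
--     return sorted(found)
-- ===== SOURCE B (Python) =====
-- LEET_MAP = str.maketrans({'@':'a','4':'a','0':'o','1':'l','3':'e','5':'s','$':'s','7':'t','+':'t','8':'b','2':'z'})
--
-- def dict_matches(pw, wordset, min_len=3):
--     # Word-driven search: instead of enumerating every substring of pw and probing
--     # the dictionary, iterate over the WORDS and look for each word's occurrences
--     # in the lowered password and in its leet-normalized image.
--     s = pw.lower()
--     t = s.translate(LEET_MAP)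
--     n = len(s)
--     lo = max(min_len, 0)
--     found = set()
--     for w in wordset:
--         L = len(w)
--         if L < lo:
--             continue
--         for i in range(min(n - L + 1, n)):
--             if s[i:i+L] == w:
--                 found.add(w)
--             if t[i:i+L] == w:
--                 found.add(s[i:i+L])
--     return sorted(found)
-- ===== Notes on version B (the rewrite author's own statement) =====
-- stated objective: faster
-- what changed: B inverts the loop structure: instead of enumerating all O(n^2) substrings of the password and probing each (and its leet-normalization) against the wordset, it iterates over the words and scans the lowered password and its once-computed leet-normalized image for each word's occurrences.
import Mathlib
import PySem

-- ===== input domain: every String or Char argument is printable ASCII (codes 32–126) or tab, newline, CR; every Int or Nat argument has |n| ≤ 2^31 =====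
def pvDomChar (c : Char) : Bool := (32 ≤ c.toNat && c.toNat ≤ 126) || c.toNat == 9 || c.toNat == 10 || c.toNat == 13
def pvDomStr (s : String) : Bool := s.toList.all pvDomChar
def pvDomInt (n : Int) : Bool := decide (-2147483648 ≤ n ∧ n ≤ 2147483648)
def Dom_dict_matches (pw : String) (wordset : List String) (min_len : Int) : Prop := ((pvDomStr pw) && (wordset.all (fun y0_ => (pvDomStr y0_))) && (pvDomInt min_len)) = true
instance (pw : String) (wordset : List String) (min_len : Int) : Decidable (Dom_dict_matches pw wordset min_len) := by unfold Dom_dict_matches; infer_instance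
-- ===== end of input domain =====

-- B inverts the loops: it iterates over the words and scans the lowered password and its
-- once-computed leet-normalized image for each word's occurrences, instead of enumerating
-- every substring and probing the wordset (asymptotically faster in the password length).


-- ===== PORT A =====
-- LEET_MAP / str.translate: the table maps single chars to single chars, so translate is an exact per-character map
def pvLeetChar (c : Char) : Char :=
  if c = '@' then 'a' else if c = '4' then 'a' else if c = '0' then 'o'
  else if c = '1' then 'l' else if c = '3' then 'e' else if c = '5' then 's'
  else if c = '$' then 's' else if c = '7' then 't' else if c = '+' then 't'
  else if c = '8' then 'b' else if c = '2' then 'z' else c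

def leet_normalize (s : List Char) : List Char := s.map pvLeetChar

def all_substrings (s : String) (min_len : Int) : List String :=
  let cs := PySem.Chars.lower s.toList
  let n : Int := cs.length
  (PySem.List.pyRange 0 n 1).foldl (fun acc i =>
    acc ++ (PySem.List.pyRange (i + min_len) (n + 1) 1).map
      (fun j => String.ofList (PySem.List.slice cs (some i) (some j)))) []

def dict_matches (pw : String) (wordset : List String) (min_len : Int) : List String :=
  let subs : PySem.Set String := PySem.Set.ofList (all_substrings pw min_len)
  -- iterating the set 'subs' only builds another set that is sorted afterwards: order-independent
  let found : PySem.Set String := subs.foldl (fun found sub =>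
    if wordset.contains sub then PySem.Set.add found sub
    else if wordset.contains (String.ofList (leet_normalize sub.toList)) then PySem.Set.add found sub
    else found) PySem.Set.empty
  PySem.List.sorted found (fun x => x) false

-- ===== PORT B =====
def dict_matches_alt (pw : String) (wordset : List String) (min_len : Int) : List String :=
  let s := PySem.Chars.lower pw.toList
  let t := s.map pvLeetChar          -- s.translate(LEET_MAP): one whole-string pass
  let n : Int := s.length
  let lo : Int := max min_len 0
  let found : PySem.Set String :=
    wordset.foldl (fun found w =>
      if ((w.toList.length : Int)) < lo then found
      else (PySem.List.pyRange 0 (min (n - (w.toList.length : Int) + 1) n) 1).foldl (fun found i =>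
        let found := if PySem.List.slice s (some i) (some (i + (w.toList.length : Int))) = w.toList
          then PySem.Set.add found w else found
        if PySem.List.slice t (some i) (some (i + (w.toList.length : Int))) = w.toList
          then PySem.Set.add found (String.ofList (PySem.List.slice s (some i) (some (i + (w.toList.length : Int)))))
          else found) found) PySem.Set.empty
  PySem.List.sorted found (fun x => x) false

-- ===== PRECONDITION & SPEC =====
def Spec_dict_matches (pw : String) (wordset : List String) (min_len : Int) (out : List String) : Prop := out = dict_matches_alt pw wordset min_len
instance (pw : String) (wordset : List String) (min_len : Int) (out : List String) : Decidable (Spec_dict_matches pw wordset min_len out) := by unfold Spec_dict_matches; infer_instance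

-- ===== CLAIM (what is proved, stated in full; the proofs are below) =====
def Claim_equal_dict_matches : Prop := ∀ (pw : String) (wordset : List String) (min_len : Int), Dom_dict_matches pw wordset min_len → Spec_dict_matches pw wordset min_len (dict_matches pw wordset min_len)

-- ===== LEMMAS AND PROOFS =====

-- the match condition, as a predicate on the substring itself
def pvCond (wordset : List String) (x : String) : Prop :=
  x ∈ wordset ∨ String.ofList (leet_normalize x.toList) ∈ wordset

-- the common substring family: substrings of the lowered password of admissible length
def pvSubP (cs : List Char) (m : Int) (x : String) : Prop :=
  ∃ i L : ℕ, i < cs.length ∧ i + L ≤ cs.length ∧ max m 0 ≤ (L : Int) ∧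
    x = String.ofList ((cs.drop i).take L)

-- B's found-set, the let-bindings of dict_matches_alt substituted (definitional)
def pvFoundB (cs : List Char) (wordset : List String) (m : Int) : PySem.Set String :=
  wordset.foldl (fun found w =>
    if ((w.toList.length : Int)) < max m 0 then found
    else (PySem.List.pyRange 0 (min ((cs.length : Int) - (w.toList.length : Int) + 1) (cs.length : Int)) 1).foldl (fun found i =>
      let found := if PySem.List.slice cs (some i) (some (i + (w.toList.length : Int))) = w.toList
        then PySem.Set.add found w else found
      if PySem.List.slice (cs.map pvLeetChar) (some i) (some (i + (w.toList.length : Int))) = w.toList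
        then PySem.Set.add found (String.ofList (PySem.List.slice cs (some i) (some (i + (w.toList.length : Int)))))
        else found) found) PySem.Set.empty

theorem pv_alt_eq (pw : String) (wordset : List String) (m : Int) :
    dict_matches_alt pw wordset m =
      PySem.List.sorted (pvFoundB (PySem.Chars.lower pw.toList) wordset m) (fun x => x) false := rfl

theorem pv_slice_map {α β : Type} (f : α → β) (xs : List α) (a b : Option ℤ) :
    PySem.List.slice (xs.map f) a b = (PySem.List.slice xs a b).map f := by
  simp [PySem.List.slice]

theorem pv_clampIdx_of_le (n : ℕ) (j : ℤ) (h0 : 0 ≤ j) (h : j ≤ n) :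
    (PySem.List.clampIdx n j : Int) = j := by
  simp [PySem.List.clampIdx]
  omega

theorem pv_mem_foldl_addIf {α β : Type} [BEq α] [LawfulBEq α] (l : List β) (f : β → α)
    (c : β → Bool) (acc : PySem.Set α) (x : α) :
    x ∈ l.foldl (fun s b => if c b then PySem.Set.add s (f b) else s) acc ↔
      x ∈ acc ∨ ∃ b ∈ l, c b = true ∧ x = f b := by
  induction l generalizing acc with
  | nil => simp
  | cons hd tl ih =>
    simp only [List.foldl_cons, ih]
    by_cases h : c hd = true <;> simp [h, PySem.Set.mem_add] <;> tauto

theorem pv_nodup_foldl_addIf {α β : Type} [BEq α] [LawfulBEq α] (l : List β) (f : β → α)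
    (c : β → Bool) (acc : PySem.Set α) (h : acc.Nodup) :
    (l.foldl (fun s b => if c b then PySem.Set.add s (f b) else s) acc).Nodup := by
  induction l generalizing acc with
  | nil => simpa
  | cons hd tl ih =>
    simp only [List.foldl_cons]
    apply ih
    by_cases hc : c hd = true <;> simp [hc, PySem.Set.nodup_add, h]

-- generic membership in a fold whose step has a pointwise membership law
theorem pv_mem_foldl_gen {α β : Type} [BEq α] (l : List β)
    (step : PySem.Set α → β → PySem.Set α) (P : β → α → Prop)
    (h : ∀ acc b x, x ∈ step acc b ↔ x ∈ acc ∨ P b x) (acc : PySem.Set α) (x : α) :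
    x ∈ l.foldl step acc ↔ x ∈ acc ∨ ∃ b ∈ l, P b x := by
  induction l generalizing acc with
  | nil => simp
  | cons hd tl ih =>
    simp only [List.foldl_cons, ih, h]
    constructor
    · rintro (⟨h | h⟩ | ⟨b, hb, hP⟩)
      · exact Or.inl h
      · exact Or.inr ⟨hd, by simp, h⟩
      · exact Or.inr ⟨b, by simp [hb], hP⟩
    · rintro (h | ⟨b, hb, hP⟩)
      · exact Or.inl (Or.inl h)
      · rcases List.mem_cons.mp hb with rfl | hb
        · exact Or.inl (Or.inr hP)
        · exact Or.inr ⟨b, hb, hP⟩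

-- generic nodup preservation
theorem pv_nodup_foldl_gen {α β : Type} [BEq α] (l : List β)
    (step : PySem.Set α → β → PySem.Set α)
    (h : ∀ acc b, acc.Nodup → (step acc b).Nodup) :
    ∀ acc : PySem.Set α, acc.Nodup → (l.foldl step acc).Nodup := by
  induction l with
  | nil => intro acc ha; simpa
  | cons hd tl ih => intro acc ha; exact ih _ (h acc hd ha)

-- A's body, rewritten to the one-test shape
theorem pvA_body_eq (wordset : List String) :
    (fun (found : PySem.Set String) (sub : String) =>
      if wordset.contains sub then PySem.Set.add found sub
      else if wordset.contains (String.ofList (leet_normalize sub.toList)) then PySem.Set.add found sub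
      else found) =
    (fun (found : PySem.Set String) (sub : String) =>
      if (wordset.contains sub || wordset.contains (String.ofList (leet_normalize sub.toList))) then
        PySem.Set.add found sub else found) := by
  funext found sub
  by_cases h1 : sub ∈ wordset <;>
    by_cases h2 : String.ofList (leet_normalize sub.toList) ∈ wordset <;>
      simp [h1, h2]

-- what A's substring generator produces, as a set
theorem pv_mem_all_substrings (pw : String) (m : Int) (x : String) :
    x ∈ all_substrings pw m ↔ pvSubP (PySem.Chars.lower pw.toList) m x := by
  unfold all_substrings pvSubP
  simp only [PySem.List.foldl_append_eq_flatMap, List.nil_append, List.mem_flatMap,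
    List.mem_map, PySem.List.mem_pyRange_one]
  constructor
  · rintro ⟨i, ⟨hi0, hin⟩, j, ⟨hjl, hjr⟩, rfl⟩
    set cs := PySem.Chars.lower pw.toList with hcs
    lift i to ℕ using hi0 with iN
    refine ⟨iN, PySem.List.clampIdx cs.length j - iN, by exact_mod_cast hin, ?_, ?_, ?_⟩
    · have := PySem.List.clampIdx_le cs.length j
      omega
    · have hle := PySem.List.clampIdx_le cs.length j
      by_cases hm : 0 < m
      · have hj0 : 0 ≤ j := by omega
        have hjn : j ≤ (cs.length : Int) := by omega
        have := pv_clampIdx_of_le cs.length j hj0 hjn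
        omega
      · omega
    · have ha : PySem.List.clampIdx cs.length (iN : Int) = iN := by
        rw [PySem.List.clampIdx_natCast]
        omega
      simp only [PySem.List.slice, ha]
  · rintro ⟨iN, L, hin, hiL, hmL, rfl⟩
    set cs := PySem.Chars.lower pw.toList with hcs
    refine ⟨(iN : Int), ⟨by positivity, by exact_mod_cast hin⟩, (iN : Int) + (L : Int),
      ⟨by omega, by omega⟩, ?_⟩
    rw [PySem.List.slice_natCast_add]

-- membership in A's found-set
theorem pv_memA (pw : String) (wordset : List String) (m : Int) (x : String) :
    x ∈ (PySem.Set.ofList (all_substrings pw m)).foldl (fun found sub =>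
      if wordset.contains sub then PySem.Set.add found sub
      else if wordset.contains (String.ofList (leet_normalize sub.toList)) then PySem.Set.add found sub
      else found) PySem.Set.empty ↔
    (pvSubP (PySem.Chars.lower pw.toList) m x ∧ pvCond wordset x) := by
  rw [pvA_body_eq]
  rw [pv_mem_foldl_addIf (f := fun (sub : String) => sub)]
  simp only [PySem.Set.mem_ofList, pv_mem_all_substrings]
  constructor
  · rintro (h | ⟨b, hb, hc, rfl⟩)
    · simp [PySem.Set.empty] at h
    · refine ⟨hb, ?_⟩
      unfold pvCond
      rcases Bool.or_eq_true_iff.mp hc with h | h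
      · exact Or.inl (by simpa using h)
      · exact Or.inr (by simpa using h)
  · rintro ⟨hs, hc⟩
    refine Or.inr ⟨x, hs, ?_, rfl⟩
    unfold pvCond at hc
    rcases hc with h | h <;> simp [h]

-- one step of B's inner loop: the two conditional adds
theorem pv_memB_inner_step (cs : List Char) (w : String) (acc : PySem.Set String) (i : Int) (x : String) :
    x ∈ (let found := if PySem.List.slice cs (some i) (some (i + (w.toList.length : Int))) = w.toList
           then PySem.Set.add acc w else acc;
         if PySem.List.slice (cs.map pvLeetChar) (some i) (some (i + (w.toList.length : Int))) = w.toList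
           then PySem.Set.add found (String.ofList (PySem.List.slice cs (some i) (some (i + (w.toList.length : Int)))))
           else found) ↔
      x ∈ acc ∨
        ((PySem.List.slice cs (some i) (some (i + (w.toList.length : Int))) = w.toList ∧ x = w) ∨
         (PySem.List.slice (cs.map pvLeetChar) (some i) (some (i + (w.toList.length : Int))) = w.toList ∧
           x = String.ofList (PySem.List.slice cs (some i) (some (i + (w.toList.length : Int)))))) := by
  show x ∈ (if PySem.List.slice (cs.map pvLeetChar) (some i) (some (i + (w.toList.length : Int))) = w.toList
      then PySem.Set.add (if PySem.List.slice cs (some i) (some (i + (w.toList.length : Int))) = w.toList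
        then PySem.Set.add acc w else acc) (String.ofList (PySem.List.slice cs (some i) (some (i + (w.toList.length : Int)))))
      else (if PySem.List.slice cs (some i) (some (i + (w.toList.length : Int))) = w.toList
        then PySem.Set.add acc w else acc)) ↔ _
  split_ifs <;> (try simp only [PySem.Set.mem_add]) <;> tauto

-- one step of B's outer loop: the per-word scan (or skip)
theorem pv_memB_outer_step (cs : List Char) (m : Int) (acc : PySem.Set String) (w : String) (x : String) :
    x ∈ (if ((w.toList.length : Int)) < max m 0 then acc
      else (PySem.List.pyRange 0 (min ((cs.length : Int) - (w.toList.length : Int) + 1) (cs.length : Int)) 1).foldl (fun found i =>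
        let found := if PySem.List.slice cs (some i) (some (i + (w.toList.length : Int))) = w.toList
          then PySem.Set.add found w else found
        if PySem.List.slice (cs.map pvLeetChar) (some i) (some (i + (w.toList.length : Int))) = w.toList
          then PySem.Set.add found (String.ofList (PySem.List.slice cs (some i) (some (i + (w.toList.length : Int)))))
          else found) acc) ↔
    x ∈ acc ∨
      (¬ ((w.toList.length : Int) < max m 0) ∧
        ∃ i : Int, (0 ≤ i ∧ i < min ((cs.length : Int) - (w.toList.length : Int) + 1) (cs.length : Int)) ∧
          ((PySem.List.slice cs (some i) (some (i + (w.toList.length : Int))) = w.toList ∧ x = w) ∨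
           (PySem.List.slice (cs.map pvLeetChar) (some i) (some (i + (w.toList.length : Int))) = w.toList ∧
             x = String.ofList (PySem.List.slice cs (some i) (some (i + (w.toList.length : Int))))))) := by
  by_cases hL : ((w.toList.length : Int)) < max m 0
  · rw [if_pos hL]
    constructor
    · exact fun h => Or.inl h
    · rintro (h | ⟨hn, _⟩)
      · exact h
      · exact absurd hL hn
  · rw [if_neg hL]
    rw [pv_mem_foldl_gen _ _
      (fun (i : Int) (x : String) =>
        ((PySem.List.slice cs (some i) (some (i + (w.toList.length : Int))) = w.toList ∧ x = w) ∨
         (PySem.List.slice (cs.map pvLeetChar) (some i) (some (i + (w.toList.length : Int))) = w.toList ∧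
           x = String.ofList (PySem.List.slice cs (some i) (some (i + (w.toList.length : Int)))))))
      (fun acc i x => pv_memB_inner_step cs w acc i x)]
    simp only [PySem.List.mem_pyRange_one, hL, not_false_iff, true_and]

-- membership in B's found-set, in terms of word occurrences
theorem pv_memB_found (cs : List Char) (wordset : List String) (m : Int) (x : String) :
    x ∈ pvFoundB cs wordset m ↔ (pvSubP cs m x ∧ pvCond wordset x) := by
  unfold pvFoundB
  rw [pv_mem_foldl_gen _ _
    (fun (w : String) (x : String) =>
      ¬ ((w.toList.length : Int) < max m 0) ∧
        ∃ i : Int, (0 ≤ i ∧ i < min ((cs.length : Int) - (w.toList.length : Int) + 1) (cs.length : Int)) ∧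
          ((PySem.List.slice cs (some i) (some (i + (w.toList.length : Int))) = w.toList ∧ x = w) ∨
           (PySem.List.slice (cs.map pvLeetChar) (some i) (some (i + (w.toList.length : Int))) = w.toList ∧
             x = String.ofList (PySem.List.slice cs (some i) (some (i + (w.toList.length : Int)))))))
    (fun acc w x => pv_memB_outer_step cs m acc w x)]
  constructor
  · rintro (h | ⟨w, hw, hL, i, ⟨hi0, hin⟩, hP⟩)
    · simp [PySem.Set.empty] at h
    · lift i to ℕ using hi0 with iN
      have hle1 : (iN : Int) < (cs.length : Int) - (w.toList.length : Int) + 1 :=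
        lt_of_lt_of_le hin (min_le_left _ _)
      have hle2 : (iN : Int) < (cs.length : Int) := lt_of_lt_of_le hin (min_le_right _ _)
      have hiL : iN + w.toList.length ≤ cs.length := by omega
      have hilt : iN < cs.length := by omega
      rw [PySem.List.slice_natCast_add, pv_slice_map, PySem.List.slice_natCast_add] at hP
      rcases hP with ⟨hsl, hx⟩ | ⟨hsl, rfl⟩
      · refine ⟨⟨iN, w.toList.length, hilt, hiL, by omega, ?_⟩, ?_⟩
        · rw [hx, hsl]; simp
        · rw [hx]; exact Or.inl hw
      · refine ⟨⟨iN, w.toList.length, hilt, hiL, by omega, rfl⟩, Or.inr ?_⟩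
        have h3 : leet_normalize (String.ofList ((cs.drop iN).take w.toList.length)).toList
            = w.toList := by
          simp only [leet_normalize]
          rw [show (String.ofList ((cs.drop iN).take w.toList.length)).toList
              = (cs.drop iN).take w.toList.length from by simp]
          exact hsl
        rw [h3]
        simpa using hw
  · rintro ⟨⟨iN, L, hilt, hiL, hmL, rfl⟩, hc⟩
    have hts : (String.ofList ((cs.drop iN).take L)).toList = (cs.drop iN).take L := by simp
    have hlen : ((cs.drop iN).take L).length = L := by
      rw [List.length_take, List.length_drop]; omega
    rcases hc with hw | hw
    · refine Or.inr ⟨_, hw, ?_, (iN : Int), ⟨by positivity, ?_⟩, Or.inl ⟨?_, rfl⟩⟩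
      · simp only [hts, hlen]; omega
      · simp only [hts, hlen]
        refine lt_min ?_ ?_ <;> omega
      · simp only [hts, hlen, PySem.List.slice_natCast_add]
    · have hw2 : (String.ofList (leet_normalize (String.ofList ((cs.drop iN).take L)).toList)).toList
          = List.map pvLeetChar ((cs.drop iN).take L) := by
        simp only [leet_normalize]
        rw [hts]
        simp
      have hwlen : (String.ofList (leet_normalize (String.ofList ((cs.drop iN).take L)).toList)).toList.length
          = L := by rw [hw2, List.length_map, hlen]
      refine Or.inr ⟨_, hw, ?_, (iN : Int), ⟨by positivity, ?_⟩, Or.inr ⟨?_, ?_⟩⟩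
      · simp only [hwlen]; omega
      · simp only [hwlen]
        refine lt_min ?_ ?_ <;> omega
      · have hlen2 : (List.take L (List.drop iN (List.map pvLeetChar cs))).length = L := by
          rw [List.length_take, List.length_drop, List.length_map]; omega
        simp only [PySem.List.slice_natCast_add, hw2, List.map_take, List.map_drop, hlen2]
      · simp only [hwlen, PySem.List.slice_natCast_add]

-- B's found-set has no duplicates
theorem pv_nodupB (cs : List Char) (wordset : List String) (m : Int) :
    (pvFoundB cs wordset m).Nodup := by
  unfold pvFoundB
  apply pv_nodup_foldl_gen
  · intro acc w ha
    by_cases hL : ((w.toList.length : Int)) < max m 0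
    · rw [if_pos hL]; exact ha
    · rw [if_neg hL]
      apply pv_nodup_foldl_gen
      · intro acc2 i ha2
        show List.Nodup (if PySem.List.slice (cs.map pvLeetChar) (some i) (some (i + (w.toList.length : Int))) = w.toList
          then PySem.Set.add (if PySem.List.slice cs (some i) (some (i + (w.toList.length : Int))) = w.toList
            then PySem.Set.add acc2 w else acc2) (String.ofList (PySem.List.slice cs (some i) (some (i + (w.toList.length : Int)))))
          else (if PySem.List.slice cs (some i) (some (i + (w.toList.length : Int))) = w.toList
            then PySem.Set.add acc2 w else acc2))
        split_ifs <;>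
          first
            | exact ha2
            | exact PySem.Set.nodup_add _ _ ha2
            | exact PySem.Set.nodup_add _ _ (PySem.Set.nodup_add _ _ ha2)
      · exact ha
  · simp [PySem.Set.empty]

-- ===== VERDICT (by name: the statement is the Claim_ definition above) =====
theorem dict_matches_spec : Claim_equal_dict_matches := by
  intro pw wordset m _
  unfold Spec_dict_matches dict_matches
  rw [pv_alt_eq]
  apply PySem.List.sorted_eq_sorted_of_perm _ _ _ (fun a b h => h)
  apply (List.perm_ext_iff_of_nodup ?_ ?_).mpr
  · intro x
    rw [pv_memA, pv_memB_found]
  · rw [pvA_body_eq]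
    exact pv_nodup_foldl_addIf _ _ _ _ (by simp [PySem.Set.empty])
  · exact pv_nodupB _ _ _
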